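-- pv_equiv track=rewrite | github.com/boliqq07/mxenes | mxene/core/functions.py | _get_err_decrease_and_increase
-- ===== SOURCE A (Python) =====
-- from collections import Counter
--
-- def _get_err_decrease_and_increase(label):
--     """返回离群值"""
--     label_dict = Counter(label)
--     common_num = Counter(list(label_dict.values())).most_common(1)[0][0]
--
--     assert common_num >= 3, "Just for super_cell"
--
--     err = []
--     decrease = []
--     increase = []
--
--     for k in label_dict.keys():
--         if label_dict[k] <= 1:
--             err.append(k)
--         if label_dict[k]==common_num-1:
--             decrease.append(k)
--         if label_dict[k] == common_num+1:
--             increase.append(k)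
--
--     if len(err) > 1 or len(decrease)>1 or len(increase) > 1:
--         raise ValueError("Just for single doping, if absorbed, "
--                          "please use ignore_index to jump the absorb atoms. "
--                          "Or the tolerance is too small.")
--
--     err = err[0] if len(err)==1 else None
--     increase = increase[0] if len(increase) == 1 else None
--     decrease = decrease[0] if len(decrease) == 1 else None
--
--     return err,decrease,increase
-- ===== SOURCE B (Python) =====
-- from collections import Counter
--
-- def _get_err_decrease_and_increase(label):
--     """返回离群值"""
--     label_dict = Counter(label)
--     common_num = Counter(list(label_dict.values())).most_common(1)[0][0]
--
--     assert common_num >= 3, "Just for super_cell"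
--
--     return _scan(list(label_dict.items()), common_num)
--
--
-- def _scan(items, common_num):
--     # recursion over the counter's items, back to front; each answer is a single
--     # Optional slot (the front-most key with the target count wins), and a second
--     # key landing in an occupied slot raises at once -- no lists, no length checks
--     if not items:
--         return (None, None, None)
--     (k, c), rest = items[0], items[1:]
--     err, decrease, increase = _scan(rest, common_num)
--     if c == 1:
--         err = _sole(k, err)
--     if c == common_num - 1:
--         decrease = _sole(k, decrease)
--     if c == common_num + 1:
--         increase = _sole(k, increase)
--     return err, decrease, increase
--
--
-- def _sole(k, prev):
--     if prev is not None:
--         raise ValueError("Just for single doping, if absorbed, "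
--                          "please use ignore_index to jump the absorb atoms. "
--                          "Or the tolerance is too small.")
--     return k
-- ===== Notes on version B (the rewrite author's own statement) =====
-- stated objective: alternative
-- what changed: A's iterative pass building three lists plus post-hoc length checks and [0]/None unpacking is replaced by a structural recursion over the counter's items, back to front, threading three single-Optional slots that return the key directly and raise immediately on a second hit.
import Mathlib
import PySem

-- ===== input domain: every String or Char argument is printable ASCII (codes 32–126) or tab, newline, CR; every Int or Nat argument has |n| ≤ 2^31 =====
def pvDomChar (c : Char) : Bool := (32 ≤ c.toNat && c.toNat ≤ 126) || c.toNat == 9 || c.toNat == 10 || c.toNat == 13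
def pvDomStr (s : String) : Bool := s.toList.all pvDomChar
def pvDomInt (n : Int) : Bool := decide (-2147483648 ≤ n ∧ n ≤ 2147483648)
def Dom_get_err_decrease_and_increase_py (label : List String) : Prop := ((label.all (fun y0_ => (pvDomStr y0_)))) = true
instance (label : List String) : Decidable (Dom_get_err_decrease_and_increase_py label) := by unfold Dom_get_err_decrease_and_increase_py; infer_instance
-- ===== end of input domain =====

-- B replaces A's iterative three-list pass + post-hoc length checks/unpacking by a
-- back-to-front structural recursion over the counter's items threading three
-- single-Option slots (objective: alternative).

-- common_num = Counter(list(label_dict.values())).most_common(1)[0][0] — the SAME line in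
-- A, in Source B and in Pre_, so defined once; most_common(1) = sorted(items, key=itemgetter(1),
-- reverse=True)[:1] (stable); [] ↦ 0 guards Python's IndexError on an empty label (excluded by Pre_).
def pvCommonOf (label : List String) : Int :=
  match PySem.List.sorted (PySem.Dict.counter (PySem.Dict.counter label).values).items
      (fun p => p.2) true with
  | [] => 0
  | p :: _ => p.1

-- ===== PORT A =====

def get_err_decrease_and_increase_py (label : List String) :
    Option String × Option String × Option String :=
  let label_dict := PySem.Dict.counter label
  let common_num := pvCommonOf label
  -- assert common_num >= 3 raises outside Pre_; the port continues
  let z := label_dict.keys.foldl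
    (fun (s : List String × List String × List String) k =>
      -- label_dict[k]: k is a key of label_dict, so getD with dummy default 0 is exact
      let s := if label_dict.getD k 0 ≤ 1 then (s.1 ++ [k], s.2.1, s.2.2) else s
      let s := if label_dict.getD k 0 == common_num - 1 then (s.1, s.2.1 ++ [k], s.2.2) else s
      if label_dict.getD k 0 == common_num + 1 then (s.1, s.2.1, s.2.2 ++ [k]) else s)
    ([], [], [])
  -- the ValueError (some length > 1) is excluded by Pre_
  -- err[0] if len(err)==1 else None (and likewise): [0] is head?, guarded by the length test
  (if z.1.length = 1 then z.1.head? else none,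
   if z.2.1.length = 1 then z.2.1.head? else none,
   if z.2.2.length = 1 then z.2.2.head? else none)

-- ===== PORT B =====
-- _sole(k, prev): prev ≠ None raises ValueError (outside Pre_); where Python returns, it returns k
def soleB (k : String) (_prev : Option String) : Option String := some k

-- _scan(items, common_num): structural recursion, back to front, three Option slots
def scanB (items : List (String × Int)) (common_num : Int) :
    Option String × Option String × Option String :=
  match items with
  | [] => (none, none, none)
  | (k, c) :: rest =>
      let s := scanB rest common_num
      let err := if c == 1 then soleB k s.1 else s.1
      let decrease := if c == common_num - 1 then soleB k s.2.1 else s.2.1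
      let increase := if c == common_num + 1 then soleB k s.2.2 else s.2.2
      (err, decrease, increase)

def get_err_decrease_and_increase_py_alt (label : List String) :
    Option String × Option String × Option String :=
  let label_dict := PySem.Dict.counter label
  let common_num := pvCommonOf label
  scanB label_dict.items common_num

-- ===== PRECONDITION & SPEC =====
-- Pre_ = exactly the inputs where Python A returns: label nonempty (else IndexError on
-- most_common), modal count ≥ 3 (else AssertionError), and each of the three buckets
-- (count = 1 / common-1 / common+1 over the distinct labels) holds at most one key
-- (else ValueError).
def Pre_get_err_decrease_and_increase_py (label : List String) : Prop :=
  label ≠ [] ∧ 3 ≤ pvCommonOf label ∧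
  ((PySem.Set.ofList label).filter (fun k => PySem.List.count label k == 1)).length ≤ 1 ∧
  ((PySem.Set.ofList label).filter (fun k => PySem.List.count label k == pvCommonOf label - 1)).length ≤ 1 ∧
  ((PySem.Set.ofList label).filter (fun k => PySem.List.count label k == pvCommonOf label + 1)).length ≤ 1
instance (label : List String) : Decidable (Pre_get_err_decrease_and_increase_py label) := by
  unfold Pre_get_err_decrease_and_increase_py; infer_instance

def pvWitness_get_err_decrease_and_increase_py : List String :=
  ["a", "a", "a", "b", "b", "b", "c"]

def Spec_get_err_decrease_and_increase_py (label : List String)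
    (out : Option String × Option String × Option String) : Prop :=
  out = get_err_decrease_and_increase_py_alt label
instance (label : List String) (out : Option String × Option String × Option String) :
    Decidable (Spec_get_err_decrease_and_increase_py label out) := by
  unfold Spec_get_err_decrease_and_increase_py; infer_instance

-- ===== CLAIM (what is proved, stated in full; the proofs are below) =====
def Claim_equal_get_err_decrease_and_increase_py : Prop :=
  ∀ (label : List String), Dom_get_err_decrease_and_increase_py label →
    Pre_get_err_decrease_and_increase_py label →
    Spec_get_err_decrease_and_increase_py label (get_err_decrease_and_increase_py label)

-- ===== LEMMAS AND PROOFS =====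

-- A's three-test loop, characterised: each component is a filter of the keys.
theorem loopA_eq (g : List String × List String × List String → String →
      List String × List String × List String)
    (p1 p2 p3 : String → Bool)
    (hg : ∀ (s : List String × List String × List String) (k : String),
      g s k = (s.1 ++ (if p1 k then [k] else []),
               s.2.1 ++ (if p2 k then [k] else []),
               s.2.2 ++ (if p3 k then [k] else [])))
    (keys : List String) (e d i : List String) :
    keys.foldl g (e, d, i)
      = (e ++ keys.filter p1, d ++ keys.filter p2, i ++ keys.filter p3) := by
  induction keys generalizing e d i with
  | nil => simp
  | cons x t ih =>
    rw [List.foldl_cons, hg, ih]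
    by_cases h1 : p1 x <;> by_cases h2 : p2 x <;> by_cases h3 : p3 x <;>
      simp [h1, h2, h3]

-- B's recursion, characterised: each slot is the FIRST item with the target count
-- (the back-to-front overwrite makes the front-most hit win).
theorem scanB_eq (items : List (String × Int)) (cm : Int) :
    scanB items cm
      = ((items.find? (fun p => p.2 == 1)).map (·.1),
         (items.find? (fun p => p.2 == cm - 1)).map (·.1),
         (items.find? (fun p => p.2 == cm + 1)).map (·.1)) := by
  induction items with
  | nil => simp [scanB]
  | cons x t ih =>
    obtain ⟨k, c⟩ := x
    simp only [scanB, ih, soleB, List.find?_cons]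
    cases hb1 : (c == (1 : Int)) <;> cases hb2 : (c == cm - 1) <;> cases hb3 : (c == cm + 1) <;>
      simp [hb1, hb2, hb3]

-- find? is the head of the filter
theorem find?_eq_head?_filter {α : Type} (l : List α) (q : α → Bool) :
    l.find? q = (l.filter q).head? := by
  induction l with
  | nil => simp
  | cons x t ih =>
    rw [List.find?_cons, List.filter_cons]
    cases h : q x
    · rw [ih]; simp
    · simp

-- A's guarded unpacking collapses to head? when the bucket has at most one element
theorem pick_eq {α : Type} (l : List α) (h : l.length ≤ 1) :
    (if l.length = 1 then l.head? else none) = l.head? := by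
  match l with
  | [] => simp
  | [x] => simp
  | x :: y :: t => simp at h

theorem ports_agree (label : List String)
    (hpre : Pre_get_err_decrease_and_increase_py label) :
    get_err_decrease_and_increase_py label = get_err_decrease_and_increase_py_alt label := by
  obtain ⟨-, -, h1, h2, h3⟩ := hpre
  unfold get_err_decrease_and_increase_py get_err_decrease_and_increase_py_alt
  dsimp only
  rw [loopA_eq _
      (fun k => decide ((PySem.Dict.counter label).getD k 0 ≤ 1))
      (fun k => (PySem.Dict.counter label).getD k 0 == pvCommonOf label - 1)
      (fun k => (PySem.Dict.counter label).getD k 0 == pvCommonOf label + 1)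
      (by intro s k
          dsimp only
          split_ifs <;> simp_all <;> omega)]
  rw [scanB_eq]
  simp only [PySem.Dict.keys_counter, PySem.Dict.items_counter,
    PySem.Dict.getD_counter, List.find?_map, Function.comp_def, Option.map_map,
    List.nil_append]
  simp only [find?_eq_head?_filter]
  -- err: count ≤ 1 coincides with count == 1 on the distinct labels
  have herr : (PySem.Set.ofList label).filter
        (fun k => decide ((List.count k label : Int) ≤ 1))
      = (PySem.Set.ofList label).filter (fun k => ((List.count k label : Int)) == 1) := by
    apply List.filter_congr
    intro k hk
    have hmem : k ∈ label := (PySem.Set.mem_ofList label k).mp hk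
    have hpos : 0 < List.count k label := List.count_pos_iff.mpr hmem
    have hiff : ((List.count k label : Int) ≤ 1 ↔ (List.count k label : Int) = 1) := by omega
    simp only [hiff]
    cases h : (List.count k label : Int) == 1 <;> simp_all
  refine Prod.ext ?_ (Prod.ext ?_ ?_)
  all_goals simp only [herr, Option.map_id']
  · refine pick_eq _ ?_
    have hcast : (PySem.Set.ofList label).filter
          (fun k => ((List.count k label : Int) == 1))
        = (PySem.Set.ofList label).filter (fun k => List.count k label == 1) := by
      apply List.filter_congr; intro k _; simp
    rw [hcast]
    simpa [PySem.List.count] using h1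
  · refine pick_eq _ ?_
    simpa [PySem.List.count] using h2
  · refine pick_eq _ ?_
    simpa [PySem.List.count] using h3

-- ===== VERDICT (by name: the statement is the Claim_ definition above) =====
theorem get_err_decrease_and_increase_py_spec : Claim_equal_get_err_decrease_and_increase_py := by
  intro label _ hpre
  unfold Spec_get_err_decrease_and_increase_py
  exact ports_agree label hpre
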